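-- pv_equiv track=rewrite | github.com/Jihyeok11/Algorithm | Python/코테/2021 카카오 블라인드/01.py | solution
-- ===== SOURCE A (Python) =====
-- def solution(new_id):
--     # 1단계, 2단계
--     id2 = ''
--     for i in new_id:
--         if 64< ord(i) <91:
--             id2 += chr(ord(i)+32)
--         elif 47< ord(i) <58 or ord(i) == 45 or ord(i) == 46 or ord(i) == 95 or 96< ord(i)< 123:
--             id2 += i
--
--     # 3단계
--     id3 = ''
--     count = 0
--     while count != len(id2):
--         id3 += id2[count]
--         if count != len(id2)-1 and id2[count]=='.' and id2[count+1]=='.':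
--             while count != len(id2)-1 and id2[count+1]=='.':
--                 count += 1
--         count +=1
--
--     # 4단계
--
--     if id3:
--         if id3[0]=='.':
--             id3 = id3[1:]
--         if id3 != '' and id3[-1]=='.':
--             id3 = id3[:-1]
--
--     # 5단계
--     if not len(id3):
--         id5 = 'a'
--     else:
--         id5 = id3
--     # 6단계
--     if len(id5)>=16:
--         id6 = id5[:15]
--         if id6[len(id6)-1]=='.':
--             id6 = id6[:14]
--     else:
--         id6 = id5
--
--     # 7단계
--     if len(id6)<3:
--         answer = id6
--         while len(answer)<3:
--             answer += id6[-1]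
--     else:
--         answer = id6
--
--
--
--     return answer
-- ===== SOURCE B (Python) =====
-- def solution(new_id):
--     # single fused pass with early exit: lowercase/filter, collapse & left-strip dots,
--     # and stop as soon as 15 chars are collected (steps 1-4 + 6's truncation fused)
--     out = []
--     for c in new_id:
--         c = c.lower()
--         if not ('a' <= c <= 'z' or '0' <= c <= '9' or c in '-_.'):
--             continue
--         if c == '.' and (not out or out[-1] == '.'):
--             continue
--         out.append(c)
--         if len(out) == 15:
--             break
--     if out and out[-1] == '.':
--         out.pop()
--     if not out:
--         out.append('a')
--     while len(out) < 3:
--         out.append(out[-1])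
--     return ''.join(out)
-- ===== Notes on version B (the rewrite author's own statement) =====
-- stated objective: faster
-- what changed: A's four staged string passes (ord-range filter, index/while dot-collapsing, strip, truncate) are fused into one single pass over the input that filters, collapses/left-strips dots and exits early once 15 characters are collected, followed by constant-time trailing-dot/default/pad fixups.
import Mathlib
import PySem

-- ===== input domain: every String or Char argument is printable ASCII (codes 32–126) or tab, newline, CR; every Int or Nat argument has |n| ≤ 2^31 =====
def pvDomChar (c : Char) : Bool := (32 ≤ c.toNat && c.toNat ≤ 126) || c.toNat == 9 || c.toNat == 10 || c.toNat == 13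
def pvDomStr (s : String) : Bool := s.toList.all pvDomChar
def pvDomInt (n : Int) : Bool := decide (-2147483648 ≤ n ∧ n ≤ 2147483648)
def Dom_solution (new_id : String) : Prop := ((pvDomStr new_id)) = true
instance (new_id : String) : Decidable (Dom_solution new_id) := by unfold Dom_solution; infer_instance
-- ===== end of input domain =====

-- B fuses A's four staged passes (filter, dot-collapse, strip, truncate) into one pass over the
-- input with an early exit once 15 characters are collected, plus constant-size fixups.

-- ===== PORT A =====
-- steps 1-2: the character-appending body of A's first for-loop
def pvAppendA (id2 : List Char) (i : Char) : List Char :=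
  if 64 < i.toNat ∧ i.toNat < 91 then id2 ++ [Char.ofNat (i.toNat + 32)]
  else if (47 < i.toNat ∧ i.toNat < 58) ∨ i.toNat = 45 ∨ i.toNat = 46 ∨ i.toNat = 95 ∨
          (96 < i.toNat ∧ i.toNat < 123) then id2 ++ [i]
  else id2

-- step 3, inner while, with a fuel argument for totality only (id2.length is always enough:
-- count advances each step and stays < len-1); Python's `count != len(id2)-1` is count < len-1
-- under the loop invariant count ≤ len-1 (A only runs this with count in range; all indexing
-- is in range too, so getD never takes its default)
def pvSkipA (id2 : List Char) : Nat → Nat → Nat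
  | 0, count => count
  | fuel + 1, count =>
      if count < id2.length - 1 ∧ id2.getD (count + 1) ' ' = '.' then
        pvSkipA id2 fuel (count + 1)
      else count

-- step 3: the count update of one iteration of the outer while loop
def pvNextA (id2 : List Char) (count : Nat) : Nat :=
  if count ≠ id2.length - 1 ∧ id2.getD count ' ' = '.' ∧ id2.getD (count + 1) ' ' = '.' then
    pvSkipA id2 id2.length count
  else count

-- step 3, outer while, fuel for totality only (count grows each iteration, so id2.length is
-- enough); Python's `count != len(id2)` is count < len (count never jumps past len)
def pvLoopA (id2 : List Char) : Nat → Nat → List Char → List Char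
  | 0, _, id3 => id3
  | fuel + 1, count, id3 =>
      if count < id2.length then
        pvLoopA id2 fuel (pvNextA id2 count + 1) (id3 ++ [id2.getD count ' '])
      else id3

-- step 7 while loop, fuel 3 is always enough (the answer grows each iteration); id6 is
-- nonempty whenever this runs, so getLastD never takes the default
def pvPadA (id6 : List Char) : Nat → List Char → List Char
  | 0, answer => answer
  | fuel + 1, answer =>
      if answer.length < 3 then pvPadA id6 fuel (answer ++ [id6.getLastD ' ']) else answer

def solution (new_id : String) : String :=
  let id2 := new_id.toList.foldl pvAppendA []
  let id3 := pvLoopA id2 id2.length 0 []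
  let id3 :=
    if id3 ≠ [] then
      let id3a := if id3.getD 0 ' ' = '.' then id3.drop 1 else id3
      if id3a ≠ [] ∧ id3a.getLastD ' ' = '.' then id3a.take (id3a.length - 1) else id3a
    else id3
  let id5 := if id3.length = 0 then ['a'] else id3
  let id6 :=
    if 16 ≤ id5.length then
      let id6a := id5.take 15
      if id6a.getD (id6a.length - 1) ' ' = '.' then id6a.take 14 else id6a
    else id5
  let answer := if id6.length < 3 then pvPadA id6 3 id6 else id6
  String.mk answer

-- ===== PORT B =====
-- B's keep-test: 'a'<=c<='z' or '0'<=c<='9' or c in '-_.'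
def pvKeepB (c : Char) : Bool :=
  decide (('a' ≤ c ∧ c ≤ 'z') ∨ ('0' ≤ c ∧ c ≤ '9') ∨ "-_.".toList.contains c = true)

-- B's single for-loop: lowercase, filter, skip a dot after a dot or at the start,
-- append, and break as soon as 15 characters are collected
def pvScanB : List Char → List Char → List Char
  | [], out => out
  | i :: rest, out =>
      if ¬ (pvKeepB (PySem.Chars.lowerChar i) = true) then pvScanB rest out
      else if PySem.Chars.lowerChar i = '.' ∧ (out = [] ∨ out.getLast? = some '.') then
        pvScanB rest out
      else if (out ++ [PySem.Chars.lowerChar i]).length = 15 then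
        out ++ [PySem.Chars.lowerChar i]
      else pvScanB rest (out ++ [PySem.Chars.lowerChar i])

-- B's final while loop (pad to length 3 with the current last char); fuel 3 is always enough
def pvPadB : Nat → List Char → List Char
  | 0, out => out
  | fuel + 1, out => if out.length < 3 then pvPadB fuel (out ++ [out.getLastD ' ']) else out

def solution_alt (new_id : String) : String :=
  let out0 := pvScanB new_id.toList []
  let out1 := if out0 ≠ [] ∧ out0.getLastD ' ' = '.' then out0.dropLast else out0
  let out2 := if out1 = [] then out1 ++ ['a'] else out1
  String.mk (pvPadB 3 out2)

-- ===== PRECONDITION & SPEC =====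
def Spec_solution (new_id : String) (out : String) : Prop := out = solution_alt new_id
instance (new_id : String) (out : String) : Decidable (Spec_solution new_id out) := by unfold Spec_solution; infer_instance

-- ===== CLAIM (what is proved, stated in full; the proofs are below) =====
def Claim_equal_solution : Prop := ∀ (new_id : String), Dom_solution new_id → Spec_solution new_id (solution new_id)

-- ===== LEMMAS AND PROOFS =====

-- per-character behaviour of A's filter loop
def pvfA (i : Char) : List Char :=
  if 64 < i.toNat ∧ i.toNat < 91 then [Char.ofNat (i.toNat + 32)]
  else if (47 < i.toNat ∧ i.toNat < 58) ∨ i.toNat = 45 ∨ i.toNat = 46 ∨ i.toNat = 95 ∨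
          (96 < i.toNat ∧ i.toNat < 123) then [i]
  else []

-- per-character behaviour of B's lower+filter
def pvfB (c : Char) : List Char :=
  if pvKeepB (PySem.Chars.lowerChar c) then [PySem.Chars.lowerChar c] else []

theorem pvAppendA_eq (acc : List Char) (c : Char) : pvAppendA acc c = acc ++ pvfA c := by
  unfold pvAppendA pvfA; split_ifs <;> simp

theorem foldl_pvAppendA (l : List Char) (acc : List Char) :
    l.foldl pvAppendA acc = acc ++ l.flatMap pvfA := by
  induction l generalizing acc with
  | nil => simp
  | cons c r ih => simp [List.foldl_cons, pvAppendA_eq, ih]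

set_option maxRecDepth 8000 in
theorem pvfA_eq_pvfB (c : Char) (hc : pvDomChar c = true) : pvfA c = pvfB c := by
  have h126 : c.toNat ≤ 126 := by
    unfold pvDomChar at hc; simp at hc; omega
  have key : ∀ n : Nat, n ≤ 126 → pvfA (Char.ofNat n) = pvfB (Char.ofNat n) := by decide
  have := key c.toNat h126
  rwa [Char.ofNat_toNat] at this

theorem flatMap_dom (L : List Char) (h : L.all pvDomChar = true) :
    L.flatMap pvfA = L.flatMap pvfB := by
  induction L with
  | nil => rfl
  | cons c r ih =>
      simp only [List.all_cons, Bool.and_eq_true] at h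
      simp [List.flatMap_cons, pvfA_eq_pvfB c h.1, ih h.2]

-- the dot-collapsing function both step-3 loops compute
def pvDed : List Char → List Char
  | [] => []
  | c :: r =>
      if c = '.' then '.' :: pvDed (r.dropWhile (· = '.')) else c :: pvDed r
termination_by l => l.length
decreasing_by
  · have := List.length_dropWhile_le (fun x => x = '.') r; simp at this ⊢; omega
  · simp

theorem pvDropCons (l : List Char) (n : Nat) (h : n < l.length) :
    l.drop n = l.getD n ' ' :: l.drop (n + 1) := by
  rw [List.drop_eq_getElem_cons h, List.getD_eq_getElem?_getD, List.getElem?_eq_getElem h]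
  rfl

theorem pvSkipA_ge (id2 : List Char) (fuel count : Nat) : count ≤ pvSkipA id2 fuel count := by
  induction fuel generalizing count with
  | zero => simp [pvSkipA]
  | succ fuel ih =>
      simp only [pvSkipA]
      split
      · have := ih (count + 1); omega
      · exact le_refl _

theorem pvSkipA_drop (id2 : List Char) (fuel count : Nat) (h : id2.length ≤ fuel + count + 1) :
    id2.drop (pvSkipA id2 fuel count + 1) = (id2.drop (count + 1)).dropWhile (· = '.') := by
  induction fuel generalizing count with
  | zero =>
      simp only [pvSkipA]
      rw [List.drop_eq_nil_of_le (by omega)]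
      rfl
  | succ fuel ih =>
      simp only [pvSkipA]
      by_cases hcnd : count < id2.length - 1 ∧ id2.getD (count + 1) ' ' = '.'
      · rw [if_pos hcnd, ih (count + 1) (by omega), pvDropCons id2 (count + 1) (by omega),
          List.dropWhile_cons_of_pos (by simpa using hcnd.2)]
      · rw [if_neg hcnd]
        by_cases hl : count + 1 < id2.length
        · have hne : ¬ id2.getD (count + 1) ' ' = '.' := fun hd => hcnd ⟨by omega, hd⟩
          rw [pvDropCons id2 (count + 1) hl,
            List.dropWhile_cons_of_neg (by simpa using hne)]
        · have h1 : id2.drop (count + 1) = [] := List.drop_eq_nil_of_le (by omega)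
          simp [h1]

theorem pvNextA_ge (id2 : List Char) (count : Nat) : count ≤ pvNextA id2 count := by
  unfold pvNextA; split
  · exact pvSkipA_ge id2 id2.length count
  · exact le_refl _

theorem pvLoopA_eq (id2 : List Char) (fuel count : Nat) (id3 : List Char)
    (hf : id2.length ≤ fuel + count) :
    pvLoopA id2 fuel count id3 = id3 ++ pvDed (id2.drop count) := by
  induction fuel generalizing count id3 with
  | zero =>
      simp only [pvLoopA]
      rw [List.drop_eq_nil_of_le (by omega)]
      simp [pvDed]
  | succ fuel ih =>
      simp only [pvLoopA]
      by_cases h : count < id2.length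
      swap
      · rw [if_neg h, List.drop_eq_nil_of_le (by omega)]
        simp [pvDed]
      rw [if_pos h]
      have hnext := pvNextA_ge id2 count
      rw [ih (pvNextA id2 count + 1) _ (by omega), pvDropCons id2 count h]
      have key : pvDed (id2.getD count ' ' :: id2.drop (count + 1)) =
          id2.getD count ' ' :: pvDed (id2.drop (pvNextA id2 count + 1)) := by
        by_cases hdot : id2.getD count ' ' = '.'
        · by_cases hcond : count ≠ id2.length - 1 ∧ id2.getD count ' ' = '.' ∧
              id2.getD (count + 1) ' ' = '.'
          · rw [show pvNextA id2 count = pvSkipA id2 id2.length count from by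
              unfold pvNextA; rw [if_pos hcond]]
            rw [pvSkipA_drop id2 id2.length count (by omega), pvDed, if_pos hdot, hdot]
          · rw [show pvNextA id2 count = count from by
              unfold pvNextA; rw [if_neg hcond]]
            rw [pvDed, if_pos hdot, hdot]
            have hdw : (id2.drop (count + 1)).dropWhile (· = '.') = id2.drop (count + 1) := by
              by_cases hl : count + 1 < id2.length
              · have hne : ¬ id2.getD (count + 1) ' ' = '.' := by
                  intro hd
                  exact hcond ⟨by omega, hdot, hd⟩
                rw [pvDropCons id2 (count + 1) hl,
                  List.dropWhile_cons_of_neg (by simpa using hne)]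
              · rw [List.drop_eq_nil_of_le (by omega)]; rfl
            rw [hdw]
        · rw [show pvNextA id2 count = count from by
            unfold pvNextA; rw [if_neg (fun hcon => hdot hcon.2.1)]]
          rw [pvDed, if_neg hdot]
      rw [key]
      simp

-- B's scan with the 15-break removed (proof device)
def pvFull : List Char → List Char → List Char
  | [], out => out
  | i :: rest, out =>
      if ¬ (pvKeepB (PySem.Chars.lowerChar i) = true) then pvFull rest out
      else if PySem.Chars.lowerChar i = '.' ∧ (out = [] ∨ out.getLast? = some '.') then
        pvFull rest out
      else pvFull rest (out ++ [PySem.Chars.lowerChar i])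

theorem pvFull_eq (l : List Char) (out : List Char) :
    pvFull l out = out ++
      (if out = [] ∨ out.getLast? = some '.'
        then pvDed ((l.flatMap pvfB).dropWhile (· = '.'))
        else pvDed (l.flatMap pvfB)) := by
  induction l generalizing out with
  | nil => split <;> simp [pvFull, pvDed]
  | cons i rest ih =>
      simp only [pvFull, List.flatMap_cons]
      by_cases hk : pvKeepB (PySem.Chars.lowerChar i) = true
      swap
      · rw [if_pos hk, ih]
        have hf : pvfB i = [] := by unfold pvfB; rw [if_neg hk]
        rw [hf, List.nil_append]
      rw [if_neg (not_not_intro hk)]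
      have hf : pvfB i = [PySem.Chars.lowerChar i] := by unfold pvfB; rw [if_pos hk]
      rw [hf]
      simp only [List.singleton_append]
      by_cases hskip : PySem.Chars.lowerChar i = '.' ∧ (out = [] ∨ out.getLast? = some '.')
      · rw [if_pos hskip, ih, if_pos hskip.2, if_pos hskip.2, hskip.1,
          List.dropWhile_cons_of_pos (by simp)]
      · rw [if_neg hskip, ih]
        by_cases hdot : PySem.Chars.lowerChar i = '.'
        · -- appended a dot; out is nonempty with non-dot last
          have hcond : ¬ (out = [] ∨ out.getLast? = some '.') := fun hc => hskip ⟨hdot, hc⟩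
          have hlast : (out ++ [PySem.Chars.lowerChar i]).getLast? = some '.' := by
            simp [hdot]
          rw [if_pos (Or.inr hlast), if_neg hcond, hdot,
            show pvDed ('.' :: rest.flatMap pvfB) =
              '.' :: pvDed ((rest.flatMap pvfB).dropWhile (· = '.')) from by
            rw [pvDed]; simp]
          simp
        · -- appended a non-dot char
          have hlast : ¬ (out ++ [PySem.Chars.lowerChar i] = [] ∨
              (out ++ [PySem.Chars.lowerChar i]).getLast? = some '.') := by
            simp [hdot]
          rw [if_neg hlast]
          have hded : pvDed (PySem.Chars.lowerChar i :: rest.flatMap pvfB) =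
              PySem.Chars.lowerChar i :: pvDed (rest.flatMap pvfB) := by
            rw [pvDed, if_neg hdot]
          by_cases hcond : out = [] ∨ out.getLast? = some '.'
          · rw [if_pos hcond, List.dropWhile_cons_of_neg (by simpa using hdot), hded]
            simp
          · rw [if_neg hcond, hded]
            simp

theorem pvFull_prefix (l : List Char) (out : List Char) :
    ∃ t, pvFull l out = out ++ t := by
  rw [pvFull_eq]; exact ⟨_, rfl⟩

theorem pvScanB_eq (l : List Char) (out : List Char) (h : out.length < 15) :
    pvScanB l out = (pvFull l out).take 15 := by
  induction l generalizing out with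
  | nil =>
      simp only [pvScanB, pvFull]
      exact (List.take_of_length_le (by omega)).symm
  | cons i rest ih =>
      simp only [pvScanB, pvFull]
      by_cases hk : pvKeepB (PySem.Chars.lowerChar i) = true
      swap
      · rw [if_pos hk, if_pos hk]
        exact ih out h
      rw [if_neg (not_not_intro hk), if_neg (not_not_intro hk)]
      by_cases hskip : PySem.Chars.lowerChar i = '.' ∧ (out = [] ∨ out.getLast? = some '.')
      · rw [if_pos hskip, if_pos hskip]; exact ih out h
      rw [if_neg hskip, if_neg hskip]
      by_cases h15 : (out ++ [PySem.Chars.lowerChar i]).length = 15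
      · rw [if_pos h15]
        obtain ⟨t, ht⟩ := pvFull_prefix rest (out ++ [PySem.Chars.lowerChar i])
        rw [ht, ← h15, List.take_left]
      · rw [if_neg h15]
        have : (out ++ [PySem.Chars.lowerChar i]).length < 15 := by
          simp at h15 ⊢; omega
        exact ih _ this

-- no two consecutive dots
def pvNoDD (l : List Char) : Prop := List.IsChain (fun a b => ¬(a = '.' ∧ b = '.')) l

theorem pvDed_head? (l : List Char) : (pvDed l).head? = l.head? := by
  cases l with
  | nil => simp [pvDed]
  | cons c r =>
      rw [pvDed]
      split <;> simp_all

theorem head?_dropWhile_ne (p : Char → Bool) (l : List Char) (x : Char)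
    (h : (l.dropWhile p).head? = some x) : p x = false := by
  induction l with
  | nil => simp at h
  | cons c r ih =>
      rw [List.dropWhile_cons] at h
      split at h
      · exact ih h
      · simp_all

theorem pvDed_nodd (l : List Char) : pvNoDD (pvDed l) := by
  fun_induction pvDed l with
  | case1 => exact List.IsChain.nil
  | case2 r ih =>
      refine List.isChain_cons.2 ⟨?_, ih⟩
      intro y hy
      have h1 : (pvDed (r.dropWhile (· = '.'))).head? = some y := hy
      rw [pvDed_head?] at h1
      have := head?_dropWhile_ne (fun x => decide (x = '.')) r y h1
      simp at this
      intro hcon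
      exact this hcon.2
  | case3 c r hdot ih =>
      refine List.isChain_cons.2 ⟨?_, ih⟩
      intro y _ hcon
      exact hdot hcon.1

-- a list whose head is not a dot is unchanged by dropWhile dot
theorem pvDropWhile_id (m : List Char) (h : m.head? ≠ some '.') :
    m.dropWhile (· = '.') = m := by
  cases m with
  | nil => rfl
  | cons c r =>
      have hc : ¬ c = '.' := fun hc => h (by simp [hc])
      rw [List.dropWhile_cons_of_neg (by simpa using hc)]

-- lstrip('.') commutes with dot-collapsing
theorem dropWhile_pvDed (l : List Char) :
    (pvDed l).dropWhile (· = '.') = pvDed (l.dropWhile (· = '.')) := by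
  cases l with
  | nil => simp [pvDed]
  | cons c r =>
      by_cases hc : c = '.'
      · subst hc
        rw [pvDed, if_pos rfl, List.dropWhile_cons_of_pos (by simp),
          List.dropWhile_cons_of_pos (by simp)]
        apply pvDropWhile_id
        rw [pvDed_head?]
        intro hh
        have := head?_dropWhile_ne (fun x => decide (x = '.')) r '.' hh
        simp at this
      · rw [pvDed, if_neg hc, List.dropWhile_cons_of_neg (by simpa using hc),
          List.dropWhile_cons_of_neg (by simpa using hc), pvDed, if_neg hc]

theorem pvNoDD_reverse (l : List Char) (h : pvNoDD l) : pvNoDD l.reverse :=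
  List.isChain_reverse.2 (h.imp (fun _ _ hab hcon => hab ⟨hcon.2, hcon.1⟩))

theorem pvDropWhile_nodd (l : List Char) (h : pvNoDD l) :
    l.dropWhile (· = '.') = if l.head? = some '.' then l.tail else l := by
  cases l with
  | nil => rfl
  | cons c r =>
      by_cases hc : c = '.'
      · subst hc
        rw [List.dropWhile_cons_of_pos (by simp), if_pos (by simp), List.tail_cons]
        cases r with
        | nil => rfl
        | cons d r' =>
            have hrel := (List.isChain_cons.1 h).1 d (by simp)
            have hd : ¬ d = '.' := fun hd => hrel ⟨rfl, hd⟩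
            rw [List.dropWhile_cons_of_neg (by simpa using hd)]
      · rw [List.dropWhile_cons_of_neg (by simpa using hc)]
        rw [if_neg (by simp [hc])]

theorem pvRstrip_nodd (l : List Char) (h : pvNoDD l) :
    (l.reverse.dropWhile (· = '.')).reverse =
      if l.getLast? = some '.' then l.dropLast else l := by
  rw [pvDropWhile_nodd l.reverse (pvNoDD_reverse l h), List.head?_reverse]
  split
  · rw [List.tail_reverse, List.reverse_reverse]
  · rw [List.reverse_reverse]

theorem pvGetLastD_iff (l : List Char) (hne : l ≠ []) :
    (l.getLastD ' ' = '.') ↔ l.getLast? = some '.' := by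
  cases hl : l.getLast? with
  | none => simp [List.getLast?_eq_none_iff] at hl; contradiction
  | some x => simp [List.getLastD_eq_getLast?, hl]

-- after dropping a trailing dot of a no-double-dot list the new last char is not a dot
theorem pvNoDD_dropLast_last (l : List Char) (h : pvNoDD l) (hl : l.getLast? = some '.') :
    l.dropLast.getLast? ≠ some '.' := by
  cases hr : l.reverse with
  | nil =>
      have : l = [] := by simpa using congrArg List.reverse hr
      rw [this] at hl; simp at hl
  | cons c t =>
      have hc : c = '.' := by
        have : l.getLast? = some c := by rw [← List.head?_reverse, hr]; rfl
        rw [hl] at this; exact (Option.some.injEq _ _ ▸ this).symm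
      have hlr : l = t.reverse ++ [c] := by
        have := congrArg List.reverse hr
        simpa using this
      have hdl : l.dropLast = t.reverse := by rw [hlr]; simp
      rw [hdl, List.getLast?_reverse]
      intro hhd
      have hch : pvNoDD l.reverse := pvNoDD_reverse l h
      rw [hr] at hch
      have := (List.isChain_cons.1 hch).1 '.' (by simpa using hhd)
      exact this ⟨hc, rfl⟩

theorem pvPadA_eq (id6 : List Char) (fuel : Nat) (ans : List Char) (h : 3 ≤ fuel + ans.length) :
    pvPadA id6 fuel ans = ans ++ List.replicate (3 - ans.length) (id6.getLastD ' ') := by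
  induction fuel generalizing ans with
  | zero =>
      have h3 : 3 - ans.length = 0 := by omega
      simp [pvPadA, h3]
  | succ fuel ih =>
      simp only [pvPadA]
      by_cases h3 : ans.length < 3
      · rw [if_pos h3, ih (ans ++ [id6.getLastD ' ']) (by simp; omega)]
        have h3' : 3 - ans.length = (3 - (ans.length + 1)) + 1 := by omega
        rw [h3', List.replicate_succ]
        simp
      · rw [if_neg h3]
        have h0 : 3 - ans.length = 0 := by omega
        simp [h0]

theorem pvPadB_eq (out : List Char) (h : out ≠ []) :
    pvPadB 3 out = out ++ List.replicate (3 - out.length) (out.getLastD ' ') := by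
  match out with
  | [a] => simp [pvPadB, List.getLastD]
  | [a, b] => simp [pvPadB, List.getLastD]
  | a :: b :: c :: r => simp [pvPadB]

theorem pvContainsDot :
    (fun c => (['.'] : List Char).contains c) = (fun c : Char => decide (c = '.')) := by
  funext c
  by_cases h : c = '.' <;> simp [h]

-- A's step 4 (zeta-reduced, as it appears in `solution`) equals strip('.')
theorem pvStrip_eq (D : List Char) (hnodd : pvNoDD D) :
    (if D ≠ [] then
      if (if D.getD 0 ' ' = '.' then D.drop 1 else D) ≠ [] ∧
          (if D.getD 0 ' ' = '.' then D.drop 1 else D).getLastD ' ' = '.' then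
        List.take ((if D.getD 0 ' ' = '.' then D.drop 1 else D).length - 1)
          (if D.getD 0 ' ' = '.' then D.drop 1 else D)
      else if D.getD 0 ' ' = '.' then D.drop 1 else D
     else D) = PySem.Chars.stripChars D ['.'] := by
  unfold PySem.Chars.stripChars
  rw [pvContainsDot]
  by_cases hD : D = []
  · simp [hD]
  · rw [if_pos hD]
    have hhead : (D.getD 0 ' ' = '.') ↔ (D.head? = some '.') := by
      cases D with
      | nil => simp at hD
      | cons c r => simp [List.getD]
    have hstep1 : (if D.getD 0 ' ' = '.' then D.drop 1 else D) =
        D.dropWhile (fun c => decide (c = '.')) := by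
      have := pvDropWhile_nodd D hnodd
      rw [show (fun c : Char => decide (c = '.')) = (· = '.') from rfl, this]
      by_cases hh : D.head? = some '.'
      · rw [if_pos (hhead.2 hh), if_pos hh, List.drop_one]
      · rw [if_neg (fun hc => hh (hhead.1 hc)), if_neg hh]
    rw [hstep1]
    set l1 := D.dropWhile (fun c => decide (c = '.')) with hl1
    have hnodd1 : pvNoDD l1 := hnodd.suffix (List.dropWhile_suffix _)
    have hr := pvRstrip_nodd l1 hnodd1
    rw [show ((· = '.') : Char → Bool) = (fun c : Char => decide (c = '.')) from rfl] at hr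
    rw [hr]
    by_cases hlast : l1.getLast? = some '.'
    · have hne : l1 ≠ [] := by
        intro hnil; rw [hnil] at hlast; simp at hlast
      rw [if_pos ⟨hne, (pvGetLastD_iff l1 hne).2 hlast⟩, if_pos hlast, List.dropLast_eq_take]
    · rw [if_neg hlast, if_neg (fun hc => hlast ((pvGetLastD_iff l1 hc.1).1 hc.2))]

-- l.getD (len-1) is the last element
theorem pvGetDLast_iff (l : List Char) (hne : l ≠ []) :
    (l.getD (l.length - 1) ' ' = '.') ↔ l.getLast? = some '.' := by
  rw [List.getLast?_eq_getElem?, List.getD_eq_getElem?_getD]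
  cases hg : l[l.length - 1]? with
  | none =>
      rw [List.getElem?_eq_none_iff] at hg
      have := List.length_pos_of_ne_nil hne
      omega
  | some x => simp

-- dropping a trailing dot of a list with a non-dot head leaves it nonempty
theorem pvDropDot_ne (l : List Char) (hne : l ≠ []) (hhead : l.head? ≠ some '.') :
    (if l.getLast? = some '.' then l.dropLast else l) ≠ [] := by
  split
  · rename_i hl
    cases l with
    | nil => simp at hne
    | cons c r =>
        cases r with
        | nil =>
            simp at hl
            exact absurd (by simp [hl]) hhead
        | cons d t => simp
  · exact hne

-- ===== VERDICT (by name: the statement is the Claim_ definition above) =====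
set_option maxHeartbeats 1000000 in
theorem solution_spec : Claim_equal_solution := by
  intro new_id hdom
  unfold Spec_solution solution solution_alt
  simp only []
  -- A steps 1-2 equal B's per-char lower+filter
  have h12 : new_id.toList.foldl pvAppendA [] = new_id.toList.flatMap pvfB := by
    rw [foldl_pvAppendA, List.nil_append]
    exact flatMap_dom new_id.toList hdom
  rw [h12]
  set m := new_id.toList.flatMap pvfB with hm
  -- A step 3 computes pvDed m
  rw [show pvLoopA m m.length 0 [] = pvDed m from by
    rw [pvLoopA_eq m m.length 0 [] (by omega)]; simp]
  -- B's scan computes (pvDed of the left-stripped stream).take 15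
  rw [pvScanB_eq new_id.toList [] (by norm_num), pvFull_eq, if_pos (Or.inl rfl),
    List.nil_append]
  set R := pvDed (m.dropWhile (· = '.')) with hR
  have hnoddR : pvNoDD R := pvDed_nodd _
  have hheadR : R.head? ≠ some '.' := by
    rw [hR, pvDed_head?]
    intro hh
    have := head?_dropWhile_ne (fun x => decide (x = '.')) m '.' hh
    simp at this
  -- A step 4 equals strip('.') equals the one-dot-each-side form over R
  have hnoddD : pvNoDD (pvDed m) := pvDed_nodd m
  have hS : PySem.Chars.stripChars (pvDed m) ['.'] =
      (if R.getLast? = some '.' then R.dropLast else R) := by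
    unfold PySem.Chars.stripChars
    rw [pvContainsDot]
    simp only []
    rw [show List.dropWhile (fun c => decide (c = '.')) (pvDed m) = R from by
      rw [hR, ← dropWhile_pvDed]]
    have := pvRstrip_nodd R hnoddR
    rw [show ((· = '.') : Char → Bool) = (fun c : Char => decide (c = '.')) from rfl] at this
    exact this
  rw [(pvStrip_eq (pvDed m) hnoddD).trans hS]
  by_cases hRnil : R = []
  · -- everything is literal: "aaa" on both sides
    rw [hRnil]
    rfl
  -- R nonempty: no leading dot, so stripping at most one trailing dot keeps it nonempty
  set S := if R.getLast? = some '.' then R.dropLast else R with hSdef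
  have hSne : S ≠ [] := pvDropDot_ne R hRnil hheadR
  have h5A : (if S.length = 0 then ['a'] else S) = S := by
    rw [if_neg (by simpa [List.length_eq_zero_iff] using hSne)]
  rw [h5A]
  -- B's fixups over U := R.take 15
  set U := R.take 15 with hU
  have hUhead : U.head? = R.head? := by
    cases hRc : R with
    | nil => exact absurd hRc hRnil
    | cons c r =>
        rw [hU, hRc, show (15 : Nat) = 14 + 1 from rfl, List.take_succ_cons]
        rfl
  have hUne : U ≠ [] := by
    intro hc
    rw [hc] at hUhead
    cases hRc : R with
    | nil => exact absurd hRc hRnil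
    | cons c r => rw [hRc] at hUhead; simp at hUhead
  have hUheadne : U.head? ≠ some '.' := by rw [hUhead]; exact hheadR
  have hVB : (if U ≠ [] ∧ U.getLastD ' ' = '.' then U.dropLast else U) =
      (if U.getLast? = some '.' then U.dropLast else U) := by
    by_cases h : U.getLast? = some '.'
    · rw [if_pos ⟨hUne, (pvGetLastD_iff U hUne).2 h⟩, if_pos h]
    · rw [if_neg (fun hc => h ((pvGetLastD_iff U hUne).1 hc.2)), if_neg h]
  rw [hVB]
  set V := if U.getLast? = some '.' then U.dropLast else U with hV
  have hVne : V ≠ [] := pvDropDot_ne U hUne hUheadne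
  rw [if_neg hVne]
  -- the core: A's steps 5-6 value equals V
  have hmain : (if 16 ≤ S.length then
      if (S.take 15).getD ((S.take 15).length - 1) ' ' = '.' then
        (S.take 15).take 14 else S.take 15
    else S) = V := by
    by_cases hlen : R.length ≤ 15
    · -- no truncation: U = R, V = S, S short
      have hUR : U = R := by rw [hU]; exact List.take_of_length_le hlen
      have hVS : V = S := by rw [hV, hUR, hSdef]
      have hSlen : S.length ≤ 15 := by
        rw [hSdef]; split
        · rw [List.length_dropLast]; omega
        · exact hlen
      rw [if_neg (by omega), hVS]
    · -- truncation: S.take 15 = U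
      have hlen16 : 16 ≤ R.length := by omega
      have hUlen : U.length = 15 := by rw [hU, List.length_take]; omega
      have hTU : S.take 15 = U := by
        rw [hSdef, hU]; split
        · rw [List.dropLast_eq_take, List.take_take]
          congr 1
          omega
        · rfl
      by_cases h16R : R.length = 16 ∧ R.getLast? = some '.'
      · -- S = R.dropLast has length exactly 15: A skips truncation, and U = S with non-dot last
        have hSR : S = R.dropLast := by rw [hSdef, if_pos h16R.2]
        have hSlen : S.length = 15 := by rw [hSR, List.length_dropLast, h16R.1]
        have hUS : U = S := by
          rw [hU, hSR, List.dropLast_eq_take, h16R.1]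
        have hUlast : U.getLast? ≠ some '.' := by
          rw [hUS, hSR]
          exact pvNoDD_dropLast_last R hnoddR h16R.2
        rw [if_neg (by omega), hV, if_neg hUlast, hUS]
      · -- S keeps length ≥ 16: A truncates to U and drops a trailing dot, exactly V
        have hSlen : 16 ≤ S.length := by
          rw [hSdef]; split
          · rename_i hl
            rw [List.length_dropLast]
            rcases Nat.lt_or_ge R.length 17 with h17 | h17
            · exact absurd ⟨by omega, hl⟩ h16R
            · omega
          · exact hlen16
        rw [if_pos hSlen, hTU, hV]
        by_cases hUlast : U.getLast? = some '.'
        · rw [if_pos ((pvGetDLast_iff U hUne).2 hUlast), if_pos hUlast,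
            List.dropLast_eq_take, hUlen]
        · rw [if_neg (fun hc => hUlast ((pvGetDLast_iff U hUne).1 hc)), if_neg hUlast]
  rw [hmain]
  -- padding: both while loops append the (unchanging) last char up to length 3
  have hpad : (if V.length < 3 then pvPadA V 3 V else V) = pvPadB 3 V := by
    rw [pvPadB_eq V hVne]
    by_cases h3 : V.length < 3
    · rw [if_pos h3, pvPadA_eq V 3 V (by omega)]
    · rw [if_neg h3, show 3 - V.length = 0 from by omega, List.replicate_zero,
        List.append_nil]
  rw [hpad]
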